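-- pv_equiv track=rewrite | github.com/pluraf/gnode-backend | app/components/network_connections.py | get_objects_from_multiline_output
-- ===== SOURCE A (Python) =====
-- def get_objects_from_multiline_output(command_response):
--     element_list = []
--     element = {}
--     is_first = True
--     first_attribute = ""
--     for line in command_response.splitlines():
--         try:
--             [attr, val] = line.split(":", 1)
--             val = val.strip()
--             if val == "--":
--                 val = ""
--             attr = attr.strip().lower()
--             if is_first:
--                 first_attribute = attr
--                 is_first = False
--             if attr == first_attribute and len(element) != 0:
--                 element_list.append(element)
--                 element = {}
--             element[attr] = val
--         except:
--             continue
--     if len(element) != 0: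
--         element_list.append(element)
--     return element_list
-- ===== SOURCE B (Python) =====
-- def get_objects_from_multiline_output(command_response):
--     # Pass 1: clean every parseable line into an (attr, val) pair.
--     pairs = []
--     for line in command_response.splitlines():
--         parts = line.split(":", 1)
--         if len(parts) == 2:
--             val = parts[1].strip()
--             pairs.append((parts[0].strip().lower(), "" if val == "--" else val))
--     if not pairs:
--         return []
--     # Pass 2: cut the pair list into segments starting at each reoccurrence
--     # of the first attribute, and turn each segment into a dict.
--     first = pairs[0][0]
--     objects = []
--     i, n = 0, len(pairs)
--     while i < n:
--         j = i + 1
--         while j < n and pairs[j][0] != first: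
--             j += 1
--         objects.append(dict(pairs[i:j]))
--         i = j
--     return objects
-- ===== Notes on version B (the rewrite author's own statement) =====
-- stated objective: alternative
-- what changed: Replaces A's single-pass state machine (dict-in-progress with is_first/first_attribute flags and a flush-on-repeat inside the line loop) by two passes: first clean every parseable line into an (attr, val) pair, then cut the pair list into segments at each reoccurrence of the first attribute and turn each segment into a dict.
import Mathlib
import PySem

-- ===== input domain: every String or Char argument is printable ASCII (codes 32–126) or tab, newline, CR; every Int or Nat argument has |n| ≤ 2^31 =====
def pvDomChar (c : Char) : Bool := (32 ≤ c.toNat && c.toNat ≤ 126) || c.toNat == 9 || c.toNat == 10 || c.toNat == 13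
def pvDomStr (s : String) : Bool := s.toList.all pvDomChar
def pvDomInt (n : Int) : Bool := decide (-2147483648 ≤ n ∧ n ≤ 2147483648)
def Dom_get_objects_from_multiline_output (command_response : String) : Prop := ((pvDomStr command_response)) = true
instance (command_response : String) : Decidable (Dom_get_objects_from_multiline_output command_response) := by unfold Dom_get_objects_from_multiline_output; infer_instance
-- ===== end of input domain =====

-- B replaces A's single-pass flush-state machine by two passes (clean every line
-- into an (attr, val) pair, then cut the pair list into segments at each
-- reoccurrence of the first attribute); objective: simpler decomposition.

-- ===== PORT A =====
-- A's loop body: try line.split(":", 1) into exactly [attr, val] (anything else → except: continue).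
def pvStepA (st : List (List (String × String)) × PySem.Dict String String × Bool × String)
    (line : String) : List (List (String × String)) × PySem.Dict String String × Bool × String :=
  match PySem.Str.splitMax? line ":" 1 with
  | some [attr0, val0] =>
      match st with
      | (element_list, element, is_first, first_attribute) =>
        let val1 := PySem.Str.strip val0
        let val : String := if val1 == "--" then "" else val1
        let attr := PySem.Str.lower (PySem.Str.strip attr0)
        let fa := if is_first then attr else first_attribute
        if attr == fa && element.size != 0 then
          (element_list ++ [element.items],
            (PySem.Dict.empty : PySem.Dict String String).insert attr val, false, fa)
        else
          (element_list, element.insert attr val, false, fa)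
  | _ => st

def get_objects_from_multiline_output (command_response : String) : List (List (String × String)) :=
  match (PySem.Str.splitlines command_response).foldl pvStepA
      (([] : List (List (String × String))), (PySem.Dict.empty : PySem.Dict String String), true, "") with
  | (element_list, element, _, _) =>
      if element.size != 0 then element_list ++ [element.items] else element_list

-- ===== PORT B =====
-- pass 1: clean a line into a pair (None when the line has no ':')
def pvParseB (line : String) : Option (String × String) :=
  match PySem.Str.splitMax? line ":" 1 with
  | some [a, v] =>
      let val := PySem.Str.strip v
      some (PySem.Str.lower (PySem.Str.strip a), if val == "--" then "" else val)
  | _ => none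

-- pass 2: cut the pair list into segments at each reoccurrence of `first`,
-- each segment becoming one dict (the two nested while loops of Source B)
def pvChunksB (first : String) : List (String × String) → List (List (String × String))
  | [] => []
  | p :: rest =>
      (PySem.Dict.ofList (p :: rest.takeWhile (fun q => q.1 != first))).items ::
        pvChunksB first (rest.dropWhile (fun q => q.1 != first))
termination_by ps => ps.length
decreasing_by
  exact Nat.lt_succ_of_le (List.length_dropWhile_le _ _)

def get_objects_from_multiline_output_alt (command_response : String) : List (List (String × String)) :=
  let pairs := (PySem.Str.splitlines command_response).filterMap pvParseB
  match pairs with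
  | [] => []
  | p :: _ => pvChunksB p.1 pairs

-- ===== PRECONDITION & SPEC =====
def Spec_get_objects_from_multiline_output (command_response : String) (out : List (List (String × String))) : Prop := out = get_objects_from_multiline_output_alt command_response
instance (command_response : String) (out : List (List (String × String))) : Decidable (Spec_get_objects_from_multiline_output command_response out) := by unfold Spec_get_objects_from_multiline_output; infer_instance

-- ===== CLAIM (what is proved, stated in full; the proofs are below) =====
def Claim_equal_get_objects_from_multiline_output : Prop := ∀ (command_response : String), Dom_get_objects_from_multiline_output command_response → Spec_get_objects_from_multiline_output command_response (get_objects_from_multiline_output command_response)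

-- ===== LEMMAS AND PROOFS =====

-- pair-level step of A's loop (the state after is_first handling)
def pvStepP (st : List (List (String × String)) × PySem.Dict String String × Bool × String)
    (p : String × String) : List (List (String × String)) × PySem.Dict String String × Bool × String :=
  match st, p with
  | (el, e, isf, fa0), (attr, val) =>
    let fa := if isf then attr else fa0
    if attr == fa && e.size != 0 then
      (el ++ [e.items], (PySem.Dict.empty : PySem.Dict String String).insert attr val, false, fa)
    else
      (el, e.insert attr val, false, fa)

def pvFinal (st : List (List (String × String)) × PySem.Dict String String × Bool × String) :
    List (List (String × String)) :=
  match st with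
  | (el, e, _, _) => if e.size != 0 then el ++ [e.items] else el

-- A's continuation after the first pair, expressed on pairs
def pvGroup (fa : String) (cur : PySem.Dict String String) :
    List (String × String) → List (List (String × String))
  | [] => [cur.items]
  | (a, v) :: rest =>
      if a == fa then cur.items :: pvGroup fa ((PySem.Dict.empty : PySem.Dict String String).insert a v) rest
      else pvGroup fa (cur.insert a v) rest

lemma pvStepA_eq (st : List (List (String × String)) × PySem.Dict String String × Bool × String)
    (line : String) :
    pvStepA st line = match pvParseB line with
      | some p => pvStepP st p
      | none => st := by
  obtain ⟨el, e, isf, fa⟩ := st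
  rcases h : PySem.Str.splitMax? line ":" 1 with _ | ⟨_ | ⟨a, _ | ⟨v, _ | _⟩⟩⟩ <;>
    simp [pvStepA, pvParseB, pvStepP, h]

lemma pvFoldA_eq (lines : List String)
    (st : List (List (String × String)) × PySem.Dict String String × Bool × String) :
    lines.foldl pvStepA st = (lines.filterMap pvParseB).foldl pvStepP st := by
  induction lines generalizing st with
  | nil => rfl
  | cons l rest ih =>
      simp only [List.foldl_cons, List.filterMap_cons, pvStepA_eq]
      cases h : pvParseB l <;> simp [ih]

lemma pvInsert_size_ne_zero (d : PySem.Dict String String) (k v : String) :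
    (d.insert k v).size ≠ 0 := by
  intro h0
  have hitems : (d.insert k v).items = [] := List.eq_nil_of_length_eq_zero h0
  have hc := PySem.Dict.contains_insert_self d k v
  have hk : k ∈ (d.insert k v).keys :=
    (PySem.Dict.contains_iff_mem_keys (d.insert k v) k).mp hc
  simp [PySem.Dict.keys, hitems] at hk

lemma pvStepP_false (el : List (List (String × String))) (e : PySem.Dict String String)
    (fa a v : String) :
    pvStepP (el, e, false, fa) (a, v) =
      if a == fa && e.size != 0 then
        (el ++ [e.items], (PySem.Dict.empty : PySem.Dict String String).insert a v, false, fa)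
      else (el, e.insert a v, false, fa) := by
  simp [pvStepP]

lemma pvFoldP_final (ps : List (String × String))
    (done : List (List (String × String))) (cur : PySem.Dict String String) (fa : String)
    (hcur : cur.size ≠ 0) :
    pvFinal (ps.foldl pvStepP (done, cur, false, fa)) = done ++ pvGroup fa cur ps := by
  induction ps generalizing done cur with
  | nil => simp [pvFinal, pvGroup, hcur]
  | cons p rest ih =>
      obtain ⟨a, v⟩ := p
      have hb : (cur.size != 0) = true := by simpa using hcur
      rw [List.foldl_cons, pvStepP_false]
      by_cases h : a = fa
      · rw [if_pos (by simp [h, hb])]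
        rw [ih _ _ (pvInsert_size_ne_zero _ _ _)]
        simp [pvGroup, h]
      · rw [if_neg (by simp [h])]
        rw [ih _ _ (pvInsert_size_ne_zero _ _ _)]
        simp [pvGroup, h]

lemma pvGroup_eq (fa : String) (ps : List (String × String)) (cur : PySem.Dict String String) :
    pvGroup fa cur ps =
      ((ps.takeWhile (fun q => q.1 != fa)).foldl (fun d q => d.insert q.1 q.2) cur).items ::
        (match ps.dropWhile (fun q => q.1 != fa) with
         | [] => []
         | q :: r => pvGroup fa ((PySem.Dict.empty : PySem.Dict String String).insert q.1 q.2) r) := by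
  induction ps generalizing cur with
  | nil => simp [pvGroup]
  | cons p rest ih =>
      obtain ⟨a, v⟩ := p
      by_cases h : a = fa
      · simp [pvGroup, h]
      · simp [pvGroup, h, ih]

lemma pvChunksB_eq_group (fa : String) :
    ∀ n (ps : List (String × String)), ps.length ≤ n → ∀ q : String × String,
      pvChunksB fa (q :: ps) = pvGroup fa ((PySem.Dict.empty : PySem.Dict String String).insert q.1 q.2) ps := by
  intro n
  induction n with
  | zero =>
      intro ps hps q
      have : ps = [] := List.eq_nil_of_length_eq_zero (Nat.le_zero.mp hps)
      subst this
      simp [pvChunksB, pvGroup,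
        show PySem.Dict.ofList [q] = ((PySem.Dict.empty : PySem.Dict String String).insert q.1 q.2) from rfl]
  | succ n ih =>
      intro ps hps q
      rw [pvChunksB, pvGroup_eq]
      have hof : PySem.Dict.ofList (q :: ps.takeWhile (fun q => q.1 != fa)) =
          (ps.takeWhile (fun q => q.1 != fa)).foldl (fun d p => d.insert p.1 p.2)
            ((PySem.Dict.empty : PySem.Dict String String).insert q.1 q.2) := rfl
      rw [hof]
      congr 1
      cases hd : ps.dropWhile (fun q => q.1 != fa) with
      | nil => simp [pvChunksB]
      | cons q' r =>
          have hlen : r.length < ps.length := by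
            have := List.length_dropWhile_le (fun q => q.1 != fa) ps
            rw [hd] at this
            simp at this
            omega
          exact ih r (by omega) q'

-- ===== VERDICT (by name: the statement is the Claim_ definition above) =====
theorem get_objects_from_multiline_output_spec : Claim_equal_get_objects_from_multiline_output := by
  intro cr _
  unfold Spec_get_objects_from_multiline_output
  unfold get_objects_from_multiline_output get_objects_from_multiline_output_alt
  rw [pvFoldA_eq]
  cases h : (PySem.Str.splitlines cr).filterMap pvParseB with
  | nil => simp [PySem.Dict.empty, PySem.Dict.size]
  | cons p rest =>
      obtain ⟨a, v⟩ := p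
      simp only [List.foldl_cons]
      have hstep : pvStepP ([], (PySem.Dict.empty : PySem.Dict String String), true, "") (a, v) =
          ([], (PySem.Dict.empty : PySem.Dict String String).insert a v, false, a) := by
        simp [pvStepP, PySem.Dict.empty, PySem.Dict.size]
      show pvFinal (rest.foldl pvStepP (pvStepP ([], PySem.Dict.empty, true, "") (a, v))) = _
      rw [hstep, pvFoldP_final _ _ _ _ (pvInsert_size_ne_zero _ _ _),
        ← pvChunksB_eq_group a rest.length rest (le_refl _) (a, v)]
      simp
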